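-- pv_equiv track=rewrite | github.com/do0134/solostudy | algorithm/1월/0105/6sol_괄호의_값.py | solve
-- ===== SOURCE A (Python) =====
-- def solve(char: str) -> int:
--     stack = list()
--     answer = 0
--     value = 1
--
--     for i in range(len(char)):
--         if char[i] == "(":
--             value *= 2
--             stack.append("(")
--         elif char[i] == "[":
--             value *= 3
--             stack.append("[")
--         elif char[i] == ")":
--             if not stack or stack[-1] == "[":
--                 return 0
--             if char[i-1] == "(":
--                 answer += value
--             stack.pop()
--             value //= 2
--         else:
--             if not stack or stack[-1] == "(":
--                 return 0
--             if char[i-1] == "[":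
--                 answer += value
--             stack.pop()
--             value //= 3
--     if stack:
--         return 0
--
--     return answer
-- ===== SOURCE B (Python) =====
-- def solve(char: str) -> int:
--     # stack of (weight, enclosing partial sum); acc = sum of completed values at current depth
--     stack = []
--     acc = 0
--     for c in char:
--         if c == "(":
--             stack.append((2, acc))
--             acc = 0
--         elif c == "[":
--             stack.append((3, acc))
--             acc = 0
--         else:
--             w = 2 if c == ")" else 3
--             if not stack or stack[-1][0] != w:
--                 return 0
--             _, prev = stack.pop()
--             acc = prev + w * (acc if acc else 1)
--     return 0 if stack else acc
-- ===== Notes on version B (the rewrite author's own statement) =====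
-- stated objective: alternative
-- what changed: B replaces A's global multiplier/answer counters and character stack (with its char[i-1] look-back to detect empty pairs) by a stack of (weight, enclosing partial-sum) pairs folded on each close, so the bracket value is built compositionally without any index arithmetic.
import Mathlib
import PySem

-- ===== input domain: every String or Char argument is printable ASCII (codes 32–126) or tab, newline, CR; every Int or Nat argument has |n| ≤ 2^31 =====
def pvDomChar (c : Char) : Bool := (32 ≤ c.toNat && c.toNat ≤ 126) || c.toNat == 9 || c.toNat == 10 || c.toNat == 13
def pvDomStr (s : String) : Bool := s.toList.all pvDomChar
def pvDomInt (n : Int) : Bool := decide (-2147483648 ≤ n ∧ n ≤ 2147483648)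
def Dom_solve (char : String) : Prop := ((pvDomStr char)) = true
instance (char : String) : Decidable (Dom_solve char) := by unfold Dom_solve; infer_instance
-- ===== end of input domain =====

-- B keeps a stack of (weight, enclosing partial sum) instead of A's char stack + global multiplier; same value, same cost.

-- ===== PORT A =====
-- Literal port of A: index loop, char stack (head = top), global `value` multiplier, `answer` sum,
-- char[i-1] look-back via PySem.List.pyGet? (negative index wraps exactly as in Python).
def solveLoopA (cs : List Char) : List Char → Nat → List Char → Int → Int → Int
  | [], _, stack, answer, _ => if stack = [] then answer else 0
  | c :: rest, i, stack, answer, value =>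
    if c = '(' then
      solveLoopA cs rest (i+1) ('(' :: stack) answer (value * 2)
    else if c = '[' then
      solveLoopA cs rest (i+1) ('[' :: stack) answer (value * 3)
    else if c = ')' then
      match stack with
      | [] => 0
      | top :: tl =>
        if top = '[' then 0
        else
          let answer' := if (PySem.List.pyGet? cs ((i : Int) - 1)).getD ' ' = '(' then answer + value else answer
          solveLoopA cs rest (i+1) tl answer' (PySem.Int.floordiv value 2)
    else
      match stack with
      | [] => 0
      | top :: tl =>
        if top = '(' then 0
        else
          let answer' := if (PySem.List.pyGet? cs ((i : Int) - 1)).getD ' ' = '[' then answer + value else answer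
          solveLoopA cs rest (i+1) tl answer' (PySem.Int.floordiv value 3)

def solve (char : String) : Int := solveLoopA char.toList char.toList 0 [] 0 1

-- ===== PORT B =====
def solveLoopB : List Char → List (Int × Int) → Int → Int
  | [], stack, acc => if stack = [] then acc else 0
  | c :: rest, stack, acc =>
    if c = '(' then solveLoopB rest ((2, acc) :: stack) 0
    else if c = '[' then solveLoopB rest ((3, acc) :: stack) 0
    else
      let w : Int := if c = ')' then 2 else 3
      match stack with
      | [] => 0
      | (w0, prev) :: tl =>
        if w0 ≠ w then 0
        else solveLoopB rest tl (prev + w * (if acc = 0 then 1 else acc))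

def solve_alt (char : String) : Int := solveLoopB char.toList [] 0

-- ===== PRECONDITION & SPEC =====
def Spec_solve (char : String) (out : Int) : Prop := out = solve_alt char
instance (char : String) (out : Int) : Decidable (Spec_solve char out) := by unfold Spec_solve; infer_instance

-- ===== CLAIM (what is proved, stated in full; the proofs are below) =====
def Claim_equal_solve : Prop := ∀ (char : String), Dom_solve char → Spec_solve char (solve char)

-- ===== LEMMAS AND PROOFS =====

-- weight of an opener character (A stores the char, B stores this weight)
def pvToW (c : Char) : Int := if c = '(' then 2 else 3

-- product of the weights on B's stack (= A's `value`)
def pvWprod : List (Int × Int) → Int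
  | [] => 1
  | (w, _) :: s => w * pvWprod s

-- flatten B's stack under a current partial sum (= A's `answer` + future contributions)
def pvFlatten : List (Int × Int) → Int → Int
  | [], acc => acc
  | (w, a) :: s, acc => pvFlatten s (a + w * acc)

lemma pvFlatten_add (s : List (Int × Int)) (x d : Int) :
    pvFlatten s (x + d) = pvFlatten s x + pvWprod s * d := by
  induction s generalizing x d with
  | nil => simp [pvFlatten, pvWprod]
  | cons p s ih =>
    obtain ⟨w, a⟩ := p
    simp only [pvFlatten, pvWprod]
    rw [mul_add, ← add_assoc, ih]
    ring

lemma pvGet?_of_drop (cs rest : List Char) (i : Nat) (c : Char)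
    (h : cs.drop i = c :: rest) :
    PySem.List.pyGet? cs ((i : Int)) = some c := by
  rw [PySem.List.pyGet?_natCast]
  have : (cs.drop i)[0]? = cs[i + 0]? := List.getElem?_drop (xs := cs) (i := i) (j := 0)
  simp [h] at this
  exact this.symm


lemma loop_eq (cs : List Char) :
    ∀ (rem : List Char) (i : Nat) (sA : List Char) (answer value : Int)
      (sB : List (Int × Int)) (acc : Int),
      cs.drop i = rem →
      sA.map pvToW = sB.map Prod.fst →
      (∀ c ∈ sA, c = '(' ∨ c = '[') →
      value = pvWprod sB →
      answer = pvFlatten sB acc →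
      0 ≤ acc →
      (∀ p ∈ sB, 0 ≤ p.2) →
      (∀ c, sA.head? = some c →
        ((PySem.List.pyGet? cs ((i : Int) - 1)).getD ' ' = c ↔ acc = 0)) →
      solveLoopA cs rem i sA answer value = solveLoopB rem sB acc := by
  intro rem
  induction rem with
  | nil =>
    intro i sA answer value sB acc hdrop hmap hchars hval hans hacc hpos hprev
    simp only [solveLoopA, solveLoopB]
    by_cases hA : sA = []
    · have hB : sB = [] := by
        cases sB with
        | nil => rfl
        | cons p t => rw [hA] at hmap; simp at hmap
      subst hA hB
      simp [pvFlatten] at hans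
      simp [hans]
    · have hB : sB ≠ [] := by
        intro hB
        rw [hB] at hmap
        simp at hmap
        exact hA hmap
      simp [hA, hB]
  | cons c rest ih =>
    intro i sA answer value sB acc hdrop hmap hchars hval hans hacc hpos hprev
    have hci : PySem.List.pyGet? cs ((i : Int)) = some c := pvGet?_of_drop cs rest i c hdrop
    have hdrop' : cs.drop (i + 1) = rest := by
      rw [← List.drop_drop, hdrop]
      rfl
    have hprevc : (PySem.List.pyGet? cs (((i + 1 : Nat) : Int) - 1)).getD ' ' = c := by
      have : ((i + 1 : Nat) : Int) - 1 = (i : Int) := by push_cast; ring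
      rw [this, hci]; rfl
    simp only [solveLoopA, solveLoopB]
    by_cases h1 : c = '('
    · subst h1
      apply ih (i + 1) ('(' :: sA) answer (value * 2) ((2, acc) :: sB) 0 hdrop'
      · simp [pvToW, hmap]
      · intro d hd
        rcases List.mem_cons.mp hd with hd | hd
        · exact Or.inl hd
        · exact hchars d hd
      · simp [pvWprod, ← hval]; ring
      · simp [pvFlatten, hans]
      · exact le_rfl
      · intro p hp
        rcases List.mem_cons.mp hp with hp | hp
        · simp [hp]; exact hacc
        · exact hpos p hp
      · intro d hd
        simp only [List.head?] at hd
        injection hd with hd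
        subst hd
        rw [hprevc]
        simp
    · by_cases h2 : c = '['
      · subst h2
        simp only [if_neg h1]
        apply ih (i + 1) ('[' :: sA) answer (value * 3) ((3, acc) :: sB) 0 hdrop'
        · simp [pvToW, hmap]
        · intro d hd
          rcases List.mem_cons.mp hd with hd | hd
          · exact Or.inr hd
          · exact hchars d hd
        · simp [pvWprod, ← hval]; ring
        · simp [pvFlatten, hans]
        · exact le_rfl
        · intro p hp
          rcases List.mem_cons.mp hp with hp | hp
          · simp [hp]; exact hacc
          · exact hpos p hp
        · intro d hd
          simp only [List.head?] at hd
          injection hd with hd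
          subst hd
          rw [hprevc]
          simp
      · -- closing character
        cases sA with
        | nil =>
          have hB : sB = [] := by
            have := congrArg List.length hmap
            simp at this
            exact List.eq_nil_of_length_eq_zero this.symm
          subst hB
          by_cases h3 : c = ')' <;> simp [h1, h2, h3]
        | cons top tl =>
          cases sB with
          | nil =>
            exfalso
            have := congrArg List.length hmap
            simp at this
          | cons p tlB =>
            obtain ⟨w0, a⟩ := p
            have hw0 : pvToW top = w0 := by
              simpa using congrArg List.head? hmap
            have hmap' : tl.map pvToW = tlB.map Prod.fst := by
              simpa using congrArg List.tail hmap
            have htop : top = '(' ∨ top = '[' := hchars top (List.mem_cons_self ..)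
            -- common tail facts
            have ha : 0 ≤ a := hpos (w0, a) (List.mem_cons_self ..)
            have hinner : 1 ≤ (if acc = 0 then 1 else acc) := by
              split_ifs with h
              · exact le_rfl
              · omega
            have hchars' : ∀ d ∈ tl, d = '(' ∨ d = '[' :=
              fun d hd => hchars d (List.mem_cons_of_mem _ hd)
            have hpos' : ∀ p ∈ tlB, 0 ≤ p.2 :=
              fun p hp => hpos p (List.mem_cons_of_mem _ hp)
            by_cases h3 : c = ')'
            · subst h3
              simp only [if_neg h1, if_neg h2]
              by_cases h4 : top = '['
              · -- A returns 0; B: w0 = 3 ≠ 2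
                have : w0 = 3 := by rw [← hw0, h4]; rfl
                simp [h4, this]
              · have htop' : top = '(' := by tauto
                have hw2 : w0 = 2 := by rw [← hw0, htop']; rfl
                subst hw2
                simp only [if_neg h4]
                have hpv : ((PySem.List.pyGet? cs ((i : Int) - 1)).getD ' ' = '(') ↔ acc = 0 := by
                  have := hprev top (by rfl)
                  rwa [htop'] at this
                have hvv : value = 2 * pvWprod tlB := by
                  rw [hval]; rfl
                have hfd : PySem.Int.floordiv value 2 = pvWprod tlB := by
                  rw [hvv, PySem.Int.floordiv_eq_ediv_of_pos (by norm_num)]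
                  exact Int.mul_ediv_cancel_left _ (by norm_num)
                apply ih (i + 1) tl _ _ tlB (a + 2 * (if acc = 0 then 1 else acc)) hdrop'
                  hmap' hchars' hfd
                · -- answer' = pvFlatten tlB acc'
                  have hansf : answer = pvFlatten tlB (a + 2 * acc) := by
                    rw [hans]; rfl
                  by_cases h5 : acc = 0
                  · rw [if_pos (hpv.mpr h5), if_pos h5, hansf, h5, hvv]
                    rw [pvFlatten_add tlB a (2 * 1), pvFlatten_add tlB a (2 * 0)]
                    ring
                  · rw [if_neg (fun h => h5 (hpv.mp h)), if_neg h5, hansf]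
                · omega
                · exact hpos'
                · intro d hd
                  have hd' : d = '(' ∨ d = '[' := hchars' d (List.mem_of_mem_head? hd)
                  constructor
                  · intro hpd
                    exfalso
                    rw [hprevc] at hpd
                    rcases hd' with h | h <;> subst h <;> exact absurd hpd (by decide)
                  · intro h; exfalso; omega
            · -- other closing char (treated as ']')
              simp only [if_neg h1, if_neg h2, if_neg h3]
              by_cases h4 : top = '('
              · have : w0 = 2 := by rw [← hw0, h4]; rfl
                simp [h4, this]
              · have htop' : top = '[' := by tauto
                have hw3 : w0 = 3 := by rw [← hw0, htop']; rfl
                subst hw3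
                simp only [if_neg h4]
                have hpv : ((PySem.List.pyGet? cs ((i : Int) - 1)).getD ' ' = '[') ↔ acc = 0 := by
                  have := hprev top (by rfl)
                  rwa [htop'] at this
                have hvv : value = 3 * pvWprod tlB := by
                  rw [hval]; rfl
                have hfd : PySem.Int.floordiv value 3 = pvWprod tlB := by
                  rw [hvv, PySem.Int.floordiv_eq_ediv_of_pos (by norm_num)]
                  exact Int.mul_ediv_cancel_left _ (by norm_num)
                apply ih (i + 1) tl _ _ tlB (a + 3 * (if acc = 0 then 1 else acc)) hdrop'
                  hmap' hchars' hfd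
                · have hansf : answer = pvFlatten tlB (a + 3 * acc) := by
                    rw [hans]; rfl
                  by_cases h5 : acc = 0
                  · rw [if_pos (hpv.mpr h5), if_pos h5, hansf, h5, hvv]
                    rw [pvFlatten_add tlB a (3 * 1), pvFlatten_add tlB a (3 * 0)]
                    ring
                  · rw [if_neg (fun h => h5 (hpv.mp h)), if_neg h5, hansf]
                · omega
                · exact hpos'
                · intro d hd
                  have hd' : d = '(' ∨ d = '[' := hchars' d (List.mem_of_mem_head? hd)
                  constructor
                  · intro hpd
                    exfalso
                    rw [hprevc] at hpd
                    rcases hd' with h | h <;> subst h <;> simp_all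
                  · intro h; exfalso; omega

-- ===== VERDICT (by name: the statement is the Claim_ definition above) =====
theorem solve_spec : Claim_equal_solve := by
  intro char _
  unfold Spec_solve solve solve_alt
  exact loop_eq char.toList char.toList 0 [] 0 1 [] 0 rfl rfl (by simp) rfl rfl le_rfl
    (by simp) (by simp)
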